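-- pv_equiv track=rewrite | github.com/gfernandf/agent-skills | runtime/auth.py | required_role_for
-- ===== SOURCE A (Python) =====
-- _ROUTE_ROLES: list[tuple[str, str, str]] = [
--     # (method, path_prefix, min_role)
--     ("GET",    "/v1/health",               "reader"),
--     ("GET",    "/openapi.json",            "reader"),
--     ("GET",    "/v1/skills/list",          "reader"),
--     ("GET",    "/v1/skills/diagnostics",   "reader"),
--     ("GET",    "/v1/skills/governance",    "reader"),
--     ("GET",    "/v1/skills/",              "reader"),     # describe
--     ("POST",   "/v1/skills/discover",      "reader"),
--     ("POST",   "/v1/skills/",              "executor"),   # execute, stream, async, attach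
--     ("POST",   "/v1/capabilities/",        "executor"),
--     ("GET",    "/v1/runs",                 "operator"),
--     ("POST",   "/v1/webhooks",             "operator"),
--     ("GET",    "/v1/webhooks",             "operator"),
--     ("DELETE", "/v1/webhooks/",            "operator"),
-- ]
--
-- def required_role_for(method: str, path: str) -> str:
--     """Resolve the minimum role needed for a given HTTP method + path."""
--     method_u = method.upper()
--     best: str = "admin"  # unknown routes require admin
--     best_len = 0
--     for m, prefix, role in _ROUTE_ROLES:
--         if m == method_u and path.startswith(prefix) and len(prefix) > best_len:
--             best = role
--             best_len = len(prefix)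
--     return best
-- ===== SOURCE B (Python) =====
-- _ROUTE_ROLES: list[tuple[str, str, str]] = [
--     # (method, path_prefix, min_role)
--     ("GET",    "/v1/health",               "reader"),
--     ("GET",    "/openapi.json",            "reader"),
--     ("GET",    "/v1/skills/list",          "reader"),
--     ("GET",    "/v1/skills/diagnostics",   "reader"),
--     ("GET",    "/v1/skills/governance",    "reader"),
--     ("GET",    "/v1/skills/",              "reader"),     # describe
--     ("POST",   "/v1/skills/discover",      "reader"),
--     ("POST",   "/v1/skills/",              "executor"),   # execute, stream, async, attach
--     ("POST",   "/v1/capabilities/",        "executor"),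
--     ("GET",    "/v1/runs",                 "operator"),
--     ("POST",   "/v1/webhooks",             "operator"),
--     ("GET",    "/v1/webhooks",             "operator"),
--     ("DELETE", "/v1/webhooks/",            "operator"),
-- ]
--
-- # Routes pre-sorted by descending prefix length (stable: equal lengths keep list order),
-- # so the first match during the scan is the longest-prefix match.
-- _SORTED_ROUTES = sorted(_ROUTE_ROLES, key=lambda r: -len(r[1]))
--
--
-- def required_role_for(method: str, path: str) -> str:
--     """Resolve the minimum role needed for a given HTTP method + path."""
--     method_u = method.upper()
--     for m, prefix, role in _SORTED_ROUTES:
--         if m == method_u and path.startswith(prefix):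
--             return role
--     return "admin"
-- ===== Notes on version B (the rewrite author's own statement) =====
-- stated objective: alternative
-- what changed: Replaces the accumulate-best-over-full-scan with a route table pre-sorted by descending prefix length (stable, so equal-length prefixes keep list order) that is scanned for the first method+startswith match, short-circuiting on the first (= longest) hit.
import Mathlib
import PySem

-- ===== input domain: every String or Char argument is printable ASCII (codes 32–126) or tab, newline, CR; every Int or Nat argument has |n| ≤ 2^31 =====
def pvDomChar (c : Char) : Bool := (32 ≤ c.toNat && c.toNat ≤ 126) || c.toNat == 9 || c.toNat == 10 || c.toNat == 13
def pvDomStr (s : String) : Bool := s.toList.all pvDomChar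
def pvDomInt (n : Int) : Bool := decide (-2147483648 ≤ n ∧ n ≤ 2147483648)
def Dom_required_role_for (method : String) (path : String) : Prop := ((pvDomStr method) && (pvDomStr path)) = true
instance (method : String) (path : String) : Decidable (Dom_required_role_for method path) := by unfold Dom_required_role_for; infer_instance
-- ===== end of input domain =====

-- B scans a route table pre-sorted by descending prefix length (stable sort) and returns
-- the first method+startswith match, instead of A's accumulate-best full scan.

-- module-level route table shared by both Pythons
def pvRouteRoles : List (String × String × String) :=
  [ ("GET",    "/v1/health",               "reader"),
    ("GET",    "/openapi.json",            "reader"),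
    ("GET",    "/v1/skills/list",          "reader"),
    ("GET",    "/v1/skills/diagnostics",   "reader"),
    ("GET",    "/v1/skills/governance",    "reader"),
    ("GET",    "/v1/skills/",              "reader"),
    ("POST",   "/v1/skills/discover",      "reader"),
    ("POST",   "/v1/skills/",              "executor"),
    ("POST",   "/v1/capabilities/",        "executor"),
    ("GET",    "/v1/runs",                 "operator"),
    ("POST",   "/v1/webhooks",             "operator"),
    ("GET",    "/v1/webhooks",             "operator"),
    ("DELETE", "/v1/webhooks/",            "operator") ]

-- ===== PORT A =====
def required_role_for (method : String) (path : String) : String :=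
  let method_u := PySem.Str.upper method
  (pvRouteRoles.foldl
    (fun (acc : String × Int) r =>
      if ((r.1 == method_u) && PySem.Str.startswith path r.2.1)
          && decide (PySem.Str.len r.2.1 > acc.2)
      then (r.2.2, PySem.Str.len r.2.1)
      else acc)
    ("admin", 0)).1

-- ===== PORT B =====
-- sorted(_ROUTE_ROLES, key=lambda r: -len(r[1]))  (stable, so descending prefix length, ties in list order)
def pvSortedRoutes : List (String × String × String) :=
  PySem.List.sorted pvRouteRoles (fun r => -(PySem.Str.len r.2.1)) false

-- the for-loop with early return
def pvFindRole (method_u : String) (path : String) : List (String × String × String) → String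
  | [] => "admin"
  | r :: rs =>
      if (r.1 == method_u) && PySem.Str.startswith path r.2.1 then r.2.2
      else pvFindRole method_u path rs

def required_role_for_alt (method : String) (path : String) : String :=
  pvFindRole (PySem.Str.upper method) path pvSortedRoutes

-- ===== PRECONDITION & SPEC =====
def Spec_required_role_for (method : String) (path : String) (out : String) : Prop := out = required_role_for_alt method path
instance (method : String) (path : String) (out : String) : Decidable (Spec_required_role_for method path out) := by unfold Spec_required_role_for; infer_instance

-- ===== CLAIM (what is proved, stated in full; the proofs are below) =====
def Claim_equal_required_role_for : Prop := ∀ (method : String) (path : String), Dom_required_role_for method path → Spec_required_role_for method path (required_role_for method path)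

-- ===== LEMMAS AND PROOFS =====

-- A's fold keeps the FIRST route of maximal prefix length among the matches (ties broken by the
-- strict '>'); B returns the FIRST match of a stable descending-length sort.  The proof goes via
-- pvH (the winner of A's scan, threshold-style) and an insertion sort pvSortD, then evaluates
-- both concrete sorts to the same literal list.

-- the stable descending-length sort of the concrete table, as a literal
def pvSortedLit : List (String × String × String) :=
  [ ("GET",    "/v1/skills/diagnostics", "reader"),
    ("GET",    "/v1/skills/governance",  "reader"),
    ("POST",   "/v1/skills/discover",    "reader"),
    ("POST",   "/v1/capabilities/",      "executor"),
    ("GET",    "/v1/skills/list",        "reader"),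
    ("GET",    "/openapi.json",          "reader"),
    ("DELETE", "/v1/webhooks/",          "operator"),
    ("POST",   "/v1/webhooks",           "operator"),
    ("GET",    "/v1/webhooks",           "operator"),
    ("GET",    "/v1/skills/",            "reader"),
    ("POST",   "/v1/skills/",            "executor"),
    ("GET",    "/v1/health",             "reader"),
    ("GET",    "/v1/runs",               "operator") ]

set_option maxHeartbeats 1000000 in
theorem pvSortedRoutes_eq : pvSortedRoutes = pvSortedLit := by decide

-- the winner of A's scan over rs, starting from best_len threshold bl
def pvH (p : String × String × String → Bool) (len : String × String × String → Int) :
    Int → List (String × String × String) → Option (String × String × String)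
  | _, [] => none
  | bl, r :: rs =>
      if p r && decide (len r > bl) then some ((pvH p len (len r) rs).getD r)
      else pvH p len bl rs

-- stable descending insertion sort on len
def pvInsD (len : String × String × String → Int) (r : String × String × String) :
    List (String × String × String) → List (String × String × String)
  | [] => [r]
  | x :: xs => if len x ≤ len r then r :: x :: xs else x :: pvInsD len r xs

def pvSortD (len : String × String × String → Int) :
    List (String × String × String) → List (String × String × String)
  | [] => []
  | r :: rs => pvInsD len r (pvSortD len rs)

theorem pvFold_eq (p : String × String × String → Bool) (len : String × String × String → Int) :
    ∀ (rs : List (String × String × String)) (b : String) (bl : Int),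
      rs.foldl (fun (acc : String × Int) r =>
          if p r && decide (len r > acc.2) then (r.2.2, len r) else acc) (b, bl)
        = match pvH p len bl rs with
          | some w => (w.2.2, len w)
          | none => (b, bl) := by
  intro rs
  induction rs with
  | nil => intro b bl; rfl
  | cons r rs ih =>
      intro b bl
      simp only [List.foldl_cons, pvH]
      by_cases h : (p r && decide (len r > bl)) = true
      · simp only [h, if_pos]
        rw [ih r.2.2 (len r)]
        cases hw : pvH p len (len r) rs <;> simp
      · simp only [Bool.not_eq_true] at h
        simp only [h, Bool.false_eq_true, if_neg, not_false_iff]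
        exact ih b bl

theorem pvMem_insD (len : String × String × String → Int) (r y : String × String × String)
    (l : List (String × String × String)) :
    y ∈ pvInsD len r l ↔ y = r ∨ y ∈ l := by
  induction l with
  | nil => simp [pvInsD]
  | cons x xs ih =>
      by_cases hx : len x ≤ len r
      · simp [pvInsD, hx]
      · simp [pvInsD, hx, ih]
        tauto

theorem pvInsD_pairwise (len : String × String × String → Int) (r : String × String × String)
    (l : List (String × String × String)) (h : l.Pairwise (fun a b => len b ≤ len a)) :
    (pvInsD len r l).Pairwise (fun a b => len b ≤ len a) := by
  induction l with
  | nil => simp [pvInsD]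
  | cons x xs ih =>
      rw [List.pairwise_cons] at h
      by_cases hx : len x ≤ len r
      · simp only [pvInsD, hx, if_pos]
        refine List.pairwise_cons.mpr ⟨?_, List.pairwise_cons.mpr h⟩
        intro y hy
        rcases List.mem_cons.mp hy with rfl | hy
        · exact hx
        · exact le_trans (h.1 y hy) hx
      · simp only [pvInsD, hx, if_neg, not_false_iff]
        refine List.pairwise_cons.mpr ⟨?_, ih h.2⟩
        intro y hy
        rcases (pvMem_insD len r y xs).mp hy with rfl | hy
        · exact le_of_lt (lt_of_not_ge hx)
        · exact h.1 y hy

theorem pvSortD_pairwise (len : String × String × String → Int)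
    (l : List (String × String × String)) :
    (pvSortD len l).Pairwise (fun a b => len b ≤ len a) := by
  induction l with
  | nil => simp [pvSortD]
  | cons r rs ih => exact pvInsD_pairwise len r _ ih

theorem pvFind_insD (p : String × String × String → Bool) (len : String × String × String → Int)
    (bl : Int) (r : String × String × String) (l : List (String × String × String))
    (hs : l.Pairwise (fun a b => len b ≤ len a)) :
    (pvInsD len r l).find? (fun x => p x && decide (len x > bl))
      = if p r && decide (len r > bl)
        then some ((l.find? (fun x => p x && decide (len x > len r))).getD r)
        else l.find? (fun x => p x && decide (len x > bl)) := by
  induction l with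
  | nil =>
      simp only [pvInsD, List.find?_nil]
      by_cases h : (p r && decide (len r > bl)) = true
      · simp [List.find?, h]
      · simp only [Bool.not_eq_true] at h
        simp [List.find?, h]
  | cons x xs ih =>
      rw [List.pairwise_cons] at hs
      by_cases hx : len x ≤ len r
      · -- r is inserted in front of x :: xs; nothing in x :: xs beats threshold len r
        have hnone : (x :: xs).find? (fun y => p y && decide (len y > len r)) = none := by
          refine List.find?_eq_none.mpr ?_
          intro y hy
          have hyr : len y ≤ len r := by
            rcases List.mem_cons.mp hy with rfl | hy'
            · exact hx
            · exact le_trans (hs.1 y hy') hx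
          simp only [Bool.and_eq_true, decide_eq_true_eq]
          rintro ⟨-, hgt⟩
          omega
        simp only [pvInsD, hx, if_pos]
        by_cases h : (p r && decide (len r > bl)) = true
        · rw [List.find?_cons_of_pos (p := fun y => p y && decide (len y > bl)) h, if_pos h, hnone]
          rfl
        · simp only [Bool.not_eq_true] at h
          rw [List.find?_cons_of_neg (p := fun y => p y && decide (len y > bl)) (by simp [h]), if_neg (by simp [h])]
      · -- r goes further right: pvInsD len r (x :: xs) = x :: pvInsD len r xs
        have hxr : len r < len x := lt_of_not_ge hx
        simp only [pvInsD, hx, if_neg, not_false_iff]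
        by_cases hqx : (p x && decide (len x > bl)) = true
        · -- x matches at threshold bl, hence also at threshold len r: both sides give some x
          have hpx : p x = true := by
            simp only [Bool.and_eq_true] at hqx; exact hqx.1
          have hqx' : (p x && decide (len x > len r)) = true := by
            simp only [Bool.and_eq_true, decide_eq_true_eq]
            exact ⟨hpx, hxr⟩
          by_cases h : (p r && decide (len r > bl)) = true
          · rw [List.find?_cons_of_pos (p := fun y => p y && decide (len y > bl)) hqx, if_pos h, List.find?_cons_of_pos (p := fun y => p y && decide (len y > len r)) hqx']
            rfl
          · rw [List.find?_cons_of_pos (p := fun y => p y && decide (len y > bl)) hqx, if_neg h, List.find?_cons_of_pos (p := fun y => p y && decide (len y > bl)) hqx]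
        · -- x does not match at threshold bl
          rw [List.find?_cons_of_neg (p := fun y => p y && decide (len y > bl)) hqx, ih hs.2]
          by_cases h : (p r && decide (len r > bl)) = true
          · -- then len r > bl, and x cannot match at threshold len r either
            have hqx' : ¬ (p x && decide (len x > len r)) = true := by
              by_cases hpx : p x = true
              · have h1 : len r > bl := by
                  simp only [Bool.and_eq_true, decide_eq_true_eq] at h
                  exact h.2
                have h2 : ¬ (len x > bl) := by
                  intro hgt
                  exact hqx (by simp [hpx, hgt])
                exfalso
                omega
              · simp only [Bool.not_eq_true] at hpx
                simp [hpx]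
            rw [if_pos h, if_pos h, List.find?_cons_of_neg (p := fun y => p y && decide (len y > len r)) hqx']
          · rw [if_neg h, if_neg h, List.find?_cons_of_neg (p := fun y => p y && decide (len y > bl)) hqx]

theorem pvH_eq_find (p : String × String × String → Bool) (len : String × String × String → Int) :
    ∀ (rs : List (String × String × String)) (bl : Int),
      pvH p len bl rs = (pvSortD len rs).find? (fun x => p x && decide (len x > bl)) := by
  intro rs
  induction rs with
  | nil => intro bl; rfl
  | cons r rs ih =>
      intro bl
      simp only [pvH, pvSortD]
      rw [pvFind_insD p len bl r _ (pvSortD_pairwise len rs)]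
      by_cases h : (p r && decide (len r > bl)) = true
      · simp only [h, if_pos, ih (len r)]
      · simp only [Bool.not_eq_true] at h
        simp only [h, Bool.false_eq_true, if_neg, not_false_iff, ih bl]

theorem pvFind_pos_len (p : String × String × String → Bool)
    (len : String × String × String → Int) (l : List (String × String × String))
    (hl : ∀ r ∈ l, (0:Int) < len r) :
    l.find? (fun x => p x && decide (len x > (0:Int))) = l.find? p := by
  induction l with
  | nil => rfl
  | cons x xs ih =>
      have hx : (decide (len x > (0:Int))) = true := by
        simp only [decide_eq_true_eq]; exact hl x (List.mem_cons_self ..)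
      by_cases hpx : p x = true
      · simp [hpx, hx]
      · simp only [Bool.not_eq_true] at hpx
        simp [hpx, hx, ih (fun r hr => hl r (List.mem_cons_of_mem _ hr))]

theorem pvFindRole_eq_find? (mu path : String) :
    ∀ (l : List (String × String × String)),
      pvFindRole mu path l
        = match l.find? (fun r => (r.1 == mu) && PySem.Str.startswith path r.2.1) with
          | some w => w.2.2
          | none => "admin" := by
  intro l
  induction l with
  | nil => rfl
  | cons r rs ih =>
      by_cases h : ((r.1 == mu) && PySem.Str.startswith path r.2.1) = true
      · rw [List.find?_cons_of_pos (p := fun r : String × String × String => (r.1 == mu) && PySem.Str.startswith path r.2.1) h]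
        simp only [pvFindRole]
        rw [if_pos h]
      · rw [List.find?_cons_of_neg (p := fun r : String × String × String => (r.1 == mu) && PySem.Str.startswith path r.2.1) h]
        simp only [pvFindRole]
        rw [if_neg h]
        exact ih

-- ===== VERDICT (by name: the statement is the Claim_ definition above) =====
theorem required_role_for_spec : Claim_equal_required_role_for := by
  intro method path _
  show required_role_for method path = required_role_for_alt method path
  simp only [required_role_for, required_role_for_alt]
  rw [pvSortedRoutes_eq, pvFindRole_eq_find?]
  refine Eq.trans (congrArg Prod.fst
    (pvFold_eq (fun r => (r.1 == PySem.Str.upper method) && PySem.Str.startswith path r.2.1)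
      (fun r => PySem.Str.len r.2.1) pvRouteRoles "admin" 0)) ?_
  rw [pvH_eq_find]
  have hsort : pvSortD (fun r => PySem.Str.len r.2.1) pvRouteRoles = pvSortedLit := by decide
  rw [hsort]
  rw [pvFind_pos_len _ _ pvSortedLit (by decide)]
  cases pvSortedLit.find?
      (fun r => (r.1 == PySem.Str.upper method) && PySem.Str.startswith path r.2.1) <;> rfl
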